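-- pv_equiv track=rewrite | github.com/paul-heyse/DocsToKG | src/DocsToKG/DocParsing/core/http.py | _coerce_status_forcelist
-- ===== SOURCE A (Python) =====
-- from collections.abc import Mapping, Sequence
--
-- def _coerce_status_forcelist(values: Sequence[int] | tuple[int, ...]) -> tuple[int, ...]:
--     seen: set[int] = set()
--     coerced: list[int] = []
--     for candidate in values:
--         code = int(candidate)
--         if code not in seen:
--             seen.add(code)
--             coerced.append(code)
--     return tuple(sorted(coerced))
-- ===== SOURCE B (Python) =====
-- def _coerce_status_forcelist(values):
--     ordered = sorted(int(v) for v in values)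
--     out = []
--     prev = None
--     for code in ordered:
--         if prev is None or code != prev:
--             out.append(code)
--             prev = code
--     return tuple(out)
-- ===== Notes on version B (the rewrite author's own statement) =====
-- stated objective: alternative
-- what changed: Replaces the membership-set dedup followed by a sort with sort-first then one adjacent-duplicate-removing pass tracking only the previously emitted value (no set at all).
import Mathlib
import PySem

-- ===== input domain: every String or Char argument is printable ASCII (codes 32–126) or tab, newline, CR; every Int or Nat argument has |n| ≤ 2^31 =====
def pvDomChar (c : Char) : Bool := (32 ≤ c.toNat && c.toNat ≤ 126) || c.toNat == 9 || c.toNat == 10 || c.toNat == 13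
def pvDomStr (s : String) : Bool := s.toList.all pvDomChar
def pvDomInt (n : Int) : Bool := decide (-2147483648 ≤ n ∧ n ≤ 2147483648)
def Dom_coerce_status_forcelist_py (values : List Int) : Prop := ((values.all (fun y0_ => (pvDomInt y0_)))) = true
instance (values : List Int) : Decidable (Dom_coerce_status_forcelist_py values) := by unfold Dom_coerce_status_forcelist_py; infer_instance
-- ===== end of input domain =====

-- B replaces A's membership-set dedup + final sort by sort-first then one adjacent-dedup pass (alternative decomposition; return-value equivalence).

-- ===== PORT A =====
-- loop: seen (a Python set) and coerced grow together; int(candidate) on an int is the identity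
def coerce_status_forcelist_py (values : List Int) : List Int :=
  let st := values.foldl (fun (st : PySem.Set Int × List Int) candidate =>
    let code := candidate
    if ¬ PySem.Set.contains st.1 code then (PySem.Set.add st.1 code, st.2 ++ [code]) else st)
    (PySem.Set.empty, [])
  PySem.List.sorted st.2 (fun x => x) false

-- ===== PORT B =====
-- one pass over the sorted list, emitting a value only when it differs from the previous one
def coerce_status_forcelist_py_alt (values : List Int) : List Int :=
  let ordered := PySem.List.sorted (values.map (fun v => v)) (fun x => x) false
  let st := ordered.foldl (fun (st : List Int × Option Int) code =>
    match st.2 with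
    | none => (st.1 ++ [code], some code)
    | some p => if code ≠ p then (st.1 ++ [code], some code) else st)
    ([], none)
  st.1

-- ===== PRECONDITION & SPEC =====
def Spec_coerce_status_forcelist_py (values : List Int) (out : List Int) : Prop := out = coerce_status_forcelist_py_alt values
instance (values : List Int) (out : List Int) : Decidable (Spec_coerce_status_forcelist_py values out) := by unfold Spec_coerce_status_forcelist_py; infer_instance

-- ===== CLAIM (what is proved, stated in full; the proofs are below) =====
def Claim_equal_coerce_status_forcelist_py : Prop := ∀ (values : List Int), Dom_coerce_status_forcelist_py values → Spec_coerce_status_forcelist_py values (coerce_status_forcelist_py values)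

-- ===== LEMMAS AND PROOFS =====

-- proof-side names for the two loop bodies (definitionally equal to the lambdas in the ports)
def pvStepA (st : PySem.Set Int × List Int) (candidate : Int) : PySem.Set Int × List Int :=
  let code := candidate
  if ¬ PySem.Set.contains st.1 code then (PySem.Set.add st.1 code, st.2 ++ [code]) else st

def pvStepB (st : List Int × Option Int) (code : Int) : List Int × Option Int :=
  match st.2 with
  | none => (st.1 ++ [code], some code)
  | some p => if code ≠ p then (st.1 ++ [code], some code) else st

theorem pvStepA_eq (s : PySem.Set Int) (c : Int) :
    pvStepA (s, s) c = (PySem.Set.add s c, PySem.Set.add s c) := by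
  by_cases h : PySem.Set.contains s c <;>
    simp [pvStepA, PySem.Set.add, PySem.Set.contains] <;>
    simp [PySem.Set.contains] at h <;> simp [h]

-- A's two accumulators coincide: the loop is just folding Set.add
theorem pvA_fold_eq (l : List Int) (s : PySem.Set Int) :
    l.foldl pvStepA (s, s) = (l.foldl PySem.Set.add s, l.foldl PySem.Set.add s) := by
  induction l generalizing s with
  | nil => rfl
  | cons c t ih => rw [List.foldl_cons, List.foldl_cons, pvStepA_eq]; exact ih _

-- B's adjacent-dedup loop: invariant over the fold
theorem pvB_fold_inv (l : List Int) (out : List Int) (prev : Option Int)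
    (hl : l.Pairwise (· ≤ ·)) (hout : out.Pairwise (· < ·))
    (hnone : prev = none → out = [])
    (hsome : ∀ p, prev = some p → p ∈ out ∧ (∀ a ∈ out, a ≤ p) ∧ (∀ x ∈ l, p ≤ x)) :
    (l.foldl pvStepB (out, prev)).1.Pairwise (· < ·) ∧
    (∀ x, x ∈ (l.foldl pvStepB (out, prev)).1 ↔ x ∈ out ∨ x ∈ l) := by
  induction l generalizing out prev with
  | nil =>
    refine ⟨hout, fun x => ?_⟩
    simp
  | cons c t ih =>
    rcases List.pairwise_cons.mp hl with ⟨hc, ht⟩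
    cases prev with
    | none =>
      have hout0 : out = [] := hnone rfl
      subst hout0
      rw [List.foldl_cons]
      have hstep : pvStepB ([], none) c = ([c], some c) := rfl
      rw [hstep]
      have := ih [c] (some c) ht (by simp) (by simp)
        (by intro p hp; cases hp; exact ⟨by simp, by simp, hc⟩)
      refine ⟨this.1, fun x => ?_⟩
      rw [this.2 x]; simp
    | some p =>
      obtain ⟨hpmem, hple, hplb⟩ := hsome p rfl
      have hpc : p ≤ c := hplb c (by simp)
      rw [List.foldl_cons]
      by_cases hne : c = p
      · subst hne
        have hstep : pvStepB (out, some c) c = (out, some c) := by simp [pvStepB]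
        rw [hstep]
        have := ih out (some c) ht hout (by simp)
          (by intro q hq; cases hq
              exact ⟨hpmem, hple, fun x hx => hplb x (by simp [hx])⟩)
        refine ⟨this.1, fun x => ?_⟩
        rw [this.2 x]
        constructor
        · rintro (h | h) <;> tauto
        · rintro (h | h)
          · tauto
          · rcases List.mem_cons.mp h with h | h
            · subst h; exact Or.inl hpmem
            · exact Or.inr h
      · have hlt : p < c := lt_of_le_of_ne hpc (fun h => hne h.symm)
        have hstep : pvStepB (out, some p) c = (out ++ [c], some c) := by
          simp [pvStepB, hne]
        rw [hstep]
        have hout2 : (out ++ [c]).Pairwise (· < ·) := by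
          rw [List.pairwise_append]
          exact ⟨hout, by simp, fun a ha b hb => by
            simp at hb; subst hb; exact lt_of_le_of_lt (hple a ha) hlt⟩
        have := ih (out ++ [c]) (some c) ht hout2 (by simp)
          (by intro q hq; cases hq
              refine ⟨by simp, fun a ha => ?_, hc⟩
              rcases List.mem_append.mp ha with h | h
              · exact le_of_lt (lt_of_le_of_lt (hple a h) hlt)
              · simp at h; omega)
        refine ⟨this.1, fun x => ?_⟩
        rw [this.2 x]; simp; tauto

-- ===== VERDICT (by name: the statement is the Claim_ definition above) =====
theorem coerce_status_forcelist_py_spec : Claim_equal_coerce_status_forcelist_py := by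
  intro values _
  unfold Spec_coerce_status_forcelist_py coerce_status_forcelist_py coerce_status_forcelist_py_alt
  simp only [List.map_id']
  have hA : (values.foldl (fun (st : PySem.Set Int × List Int) candidate =>
      let code := candidate
      if ¬ PySem.Set.contains st.1 code then (PySem.Set.add st.1 code, st.2 ++ [code]) else st)
      (PySem.Set.empty, [])) = (PySem.Set.ofList values, PySem.Set.ofList values) := by
    have h1 : (fun (st : PySem.Set Int × List Int) candidate =>
        let code := candidate
        if ¬ PySem.Set.contains st.1 code then (PySem.Set.add st.1 code, st.2 ++ [code]) else st)
        = pvStepA := rfl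
    rw [h1]
    have := pvA_fold_eq values []
    simpa [PySem.Set.empty, PySem.Set.ofList_eq_foldl] using this
  rw [hA]
  set s := PySem.List.sorted values (fun x => x) false with hs
  have hsort : s.Pairwise (· ≤ ·) := by
    simpa using PySem.List.sorted_pairwise (xs := values) (key := fun x => x)
  have h2 : (fun (st : List Int × Option Int) code =>
      match st.2 with
      | none => (st.1 ++ [code], some code)
      | some p => if code ≠ p then (st.1 ++ [code], some code) else st) = pvStepB := rfl
  rw [h2]
  have hinv := pvB_fold_inv s [] none hsort (by simp) (by simp) (by simp)
  set r := (s.foldl pvStepB ([], none)).1 with hr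
  have hrlt : r.Pairwise (· < ·) := hinv.1
  have hrmem : ∀ x, x ∈ r ↔ x ∈ values := by
    intro x
    rw [hinv.2 x]
    simp [hs, PySem.List.mem_sorted]
  have hperm : r.Perm (PySem.Set.ofList values) := by
    rw [List.perm_ext_iff_of_nodup (hrlt.imp ne_of_lt) (PySem.Set.nodup_ofList values)]
    intro x
    rw [hrmem x, PySem.Set.mem_ofList]
  have hfin := PySem.List.sorted_eq_of_perm_of_pairwise_lt (key := fun x => x)
    (xs := PySem.Set.ofList values) (ys := r) hperm (by simpa using hrlt)
  simpa using hfin
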